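-- pv_equiv track=rewrite | github.com/YeQ456/Python-Examples | 进阶/例264.最小字符串.py | findMinC
-- ===== SOURCE A (Python) =====
-- def findMinC(s, k):
-- 	ans = 0
-- 	if len(s) <= k:
-- 		return -1
-- 	for i in range(1, k + 1):
-- 		if ord(s[i]) < ord(s[i - 1]):
-- 			ans = i
-- 	return ans
-- ===== SOURCE B (Python) =====
-- def findMinC(s, k):
--     if len(s) <= k:
--         return -1
--     for i in range(k, 0, -1):
--         if ord(s[i]) < ord(s[i - 1]):
--             return i
--     return 0
-- ===== Notes on version B (the rewrite author's own statement) =====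
-- stated objective: alternative
-- what changed: B scans the prefix backwards from k and returns at the first descent found (which is A's last descent), instead of A's forward scan that always visits all k positions overwriting a running answer.
import Mathlib
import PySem

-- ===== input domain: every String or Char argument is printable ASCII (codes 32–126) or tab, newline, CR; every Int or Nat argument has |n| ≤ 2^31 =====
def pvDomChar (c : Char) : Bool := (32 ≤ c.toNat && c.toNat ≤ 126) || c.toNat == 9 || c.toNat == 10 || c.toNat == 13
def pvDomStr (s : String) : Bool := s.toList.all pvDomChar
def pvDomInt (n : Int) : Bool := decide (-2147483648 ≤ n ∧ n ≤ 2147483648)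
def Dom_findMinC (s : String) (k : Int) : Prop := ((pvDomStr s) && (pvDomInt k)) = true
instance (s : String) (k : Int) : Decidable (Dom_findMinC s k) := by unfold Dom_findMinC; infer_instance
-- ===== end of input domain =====

-- B scans the prefix backwards from k and returns at the first descent (A's last), instead of A's forward scan overwriting a running answer.


-- ===== PORT A =====
-- one loop step: 'if ord(s[i]) < ord(s[i-1]): ans = i'; the guard guarantees both
-- indices are in range, so the 'none' fallback (Python's IndexError) is never reached
def findMinCStep (s : String) (ans : Int) (i : Int) : Int :=
  match PySem.Str.pyGet? s i, PySem.Str.pyGet? s (i - 1) with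
  | some c, some p => if c.toNat < p.toNat then i else ans
  | _, _ => ans

def findMinC (s : String) (k : Int) : Int :=
  if PySem.Str.len s ≤ k then -1
  else (PySem.List.pyRange 1 (k + 1) 1).foldl (findMinCStep s) 0

-- ===== PORT B =====
-- 'for i in range(k, 0, -1): if ord(s[i]) < ord(s[i-1]): return i' / 'return 0',
-- as structural recursion on the countdown; the 'none' fallback is never reached
def findMinCDown (s : String) : Nat → Int
  | 0 => 0
  | n + 1 =>
    match PySem.Str.pyGet? s ((n : Int) + 1), PySem.Str.pyGet? s (((n : Int) + 1) - 1) with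
    | some c, some p => if c.toNat < p.toNat then (n : Int) + 1 else findMinCDown s n
    | _, _ => findMinCDown s n

def findMinC_alt (s : String) (k : Int) : Int :=
  if PySem.Str.len s ≤ k then -1
  else findMinCDown s k.toNat

-- ===== PRECONDITION & SPEC =====
def Spec_findMinC (s : String) (k : Int) (out : Int) : Prop := out = findMinC_alt s k
instance (s : String) (k : Int) (out : Int) : Decidable (Spec_findMinC s k out) := by unfold Spec_findMinC; infer_instance

-- ===== CLAIM (what is proved, stated in full; the proofs are below) =====
def Claim_equal_findMinC : Prop := ∀ (s : String) (k : Int), Dom_findMinC s k → Spec_findMinC s k (findMinC s k)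

-- ===== LEMMAS AND PROOFS =====

-- the forward fold that keeps the LAST descent index equals the backward first-match scan
theorem findMinC_loop_eq (s : String) : ∀ n : Nat,
    (PySem.List.pyRange 1 ((n : Int) + 1) 1).foldl (findMinCStep s) 0 = findMinCDown s n := by
  intro n
  induction n with
  | zero => simp [PySem.List.pyRange_one_eq_nil, findMinCDown]
  | succ n ih =>
    have h : ((n : Int) + 1 + 1) = ((n : Int) + 1) + 1 := by ring
    rw [show ((n + 1 : Nat) : Int) + 1 = ((n : Int) + 1) + 1 by push_cast; ring,
        PySem.List.pyRange_one_succ_right (by omega),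
        List.foldl_append, ih]
    show findMinCStep s (findMinCDown s n) ((n : Int) + 1) = findMinCDown s (n + 1)
    simp only [findMinCStep]
    conv_rhs => rw [findMinCDown]

-- ===== VERDICT (by name: the statement is the Claim_ definition above) =====
theorem findMinC_spec : Claim_equal_findMinC := by
  intro s k _
  unfold Spec_findMinC findMinC findMinC_alt
  split_ifs with hg
  · rfl
  · by_cases hk : 0 ≤ k
    · rw [show k + 1 = (k.toNat : Int) + 1 by omega]
      exact findMinC_loop_eq s k.toNat
    · rw [show k.toNat = 0 by omega,
          PySem.List.pyRange_one_eq_nil (by omega)]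
      rfl
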